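-- pv_equiv track=rewrite | github.com/paiml/depyler | examples/hard_pathological_control2.py | skip_and_collect
-- ===== SOURCE A (Python) =====
-- def skip_and_collect(nums: list[int], skip_val: int, stop_val: int) -> list[int]:
--     """Collect nums, skipping skip_val, stopping at stop_val."""
--     result: list[int] = []
--     i: int = 0
--     while i < len(nums):
--         val: int = nums[i]
--         i = i + 1
--         if val == stop_val:
--             break
--         if val == skip_val:
--             continue
--         result.append(val)
--     return result
-- ===== SOURCE B (Python) =====
-- def skip_and_collect(nums: list[int], skip_val: int, stop_val: int) -> list[int]:
--     """Collect nums, skipping skip_val, stopping at stop_val."""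
--     try:
--         end = nums.index(stop_val)
--     except ValueError:
--         end = len(nums)
--     result = nums[:end]
--     while skip_val in result:
--         result.remove(skip_val)
--     return result
-- ===== Notes on version B (the rewrite author's own statement) =====
-- stated objective: faster
-- what changed: Replaced A's fused element-by-element scan (break/continue/append) with an index-and-mutate algorithm: locate the first stop_val with list.index, slice the prefix, then delete skip_val occurrences by a repeated membership-test-and-remove loop (C-level primitives instead of an interpreted per-element loop).
import Mathlib
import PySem

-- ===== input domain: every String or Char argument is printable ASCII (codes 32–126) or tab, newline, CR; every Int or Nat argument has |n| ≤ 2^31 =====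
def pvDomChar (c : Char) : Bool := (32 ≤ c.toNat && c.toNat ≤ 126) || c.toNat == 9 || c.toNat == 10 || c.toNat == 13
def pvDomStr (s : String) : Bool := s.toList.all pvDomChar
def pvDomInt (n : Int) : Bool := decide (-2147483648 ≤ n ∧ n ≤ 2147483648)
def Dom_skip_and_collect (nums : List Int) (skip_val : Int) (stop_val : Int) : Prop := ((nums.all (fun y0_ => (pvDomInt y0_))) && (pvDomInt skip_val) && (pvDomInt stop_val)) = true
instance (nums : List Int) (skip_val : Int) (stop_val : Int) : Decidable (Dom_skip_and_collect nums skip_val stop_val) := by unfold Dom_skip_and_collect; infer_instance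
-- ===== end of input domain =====

-- ===== PORT A =====
-- B replaces A's fused scan by: list.index to find the stop, a slice, then a repeated in-test/remove loop
-- deleting skip_val occurrences (alternative algorithm, same cost class).
-- loop body of A: consume nums left to right, break on stop_val, continue on skip_val, else append to result
def skip_and_collect_go (skip_val : Int) (stop_val : Int) : List Int → List Int → List Int
  | [], result => result
  | val :: rest, result =>
    if val = stop_val then result
    else if val = skip_val then skip_and_collect_go skip_val stop_val rest result
    else skip_and_collect_go skip_val stop_val rest (result ++ [val])

def skip_and_collect (nums : List Int) (skip_val : Int) (stop_val : Int) : List Int :=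
  skip_and_collect_go skip_val stop_val nums []

-- ===== PORT B =====
-- while skip_val in result: result.remove(skip_val)   (remove? is some here since membership was just tested)
def sc_remove_loop (skip_val : Int) (result : List Int) : List Int :=
  if h : skip_val ∈ result then
    match h2 : PySem.List.remove? result skip_val with
    | some r =>
      have : r.length < result.length := by
        rw [PySem.List.remove?_eq_some_erase result skip_val h] at h2
        cases h2
        simpa [List.length_erase_of_mem h] using Nat.sub_lt (List.length_pos_of_mem h) one_pos
      sc_remove_loop skip_val r
    | none => result
  else result
termination_by result.length

def skip_and_collect_alt (nums : List Int) (skip_val : Int) (stop_val : Int) : List Int :=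
  -- try: end = nums.index(stop_val)  except ValueError: end = len(nums)
  let e : Int := match PySem.List.index? nums stop_val with
    | some k => (k : Int)
    | none => (nums.length : Int)
  let result := PySem.List.slice nums none (some e)   -- nums[:end]
  sc_remove_loop skip_val result

-- ===== PRECONDITION & SPEC =====
def Spec_skip_and_collect (nums : List Int) (skip_val : Int) (stop_val : Int) (out : List Int) : Prop := out = skip_and_collect_alt nums skip_val stop_val
instance (nums : List Int) (skip_val : Int) (stop_val : Int) (out : List Int) : Decidable (Spec_skip_and_collect nums skip_val stop_val out) := by unfold Spec_skip_and_collect; infer_instance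

-- ===== CLAIM (what is proved, stated in full; the proofs are below) =====
def Claim_equal_skip_and_collect : Prop := ∀ (nums : List Int) (skip_val : Int) (stop_val : Int), Dom_skip_and_collect nums skip_val stop_val → Spec_skip_and_collect nums skip_val stop_val (skip_and_collect nums skip_val stop_val)

-- ===== LEMMAS AND PROOFS =====

-- A's loop accumulates the skip-filtered stop-prefix
theorem skip_and_collect_go_eq (skip_val stop_val : Int) (nums result : List Int) :
    skip_and_collect_go skip_val stop_val nums result
      = result ++ (nums.takeWhile (fun x => x ≠ stop_val)).filter (fun x => x ≠ skip_val) := by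
  induction nums generalizing result with
  | nil => simp [skip_and_collect_go]
  | cons v rest ih =>
    by_cases hstop : v = stop_val
    · simp [skip_and_collect_go, hstop, List.takeWhile]
    · by_cases hskip : v = skip_val
      · subst hskip; simp [skip_and_collect_go, hstop, List.takeWhile, ih]
      · simp [skip_and_collect_go, hstop, hskip, List.takeWhile, ih]

-- erasing one occurrence of skip_val does not change the skip-filter
theorem filter_erase_eq (skip_val : Int) (l : List Int) :
    (l.erase skip_val).filter (fun x => x ≠ skip_val) = l.filter (fun x => x ≠ skip_val) := by
  induction l with
  | nil => simp
  | cons v rest ih =>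
    by_cases hv : v = skip_val
    · subst hv; simp [List.erase_cons_head]
    · rw [List.erase_cons_tail (by simp [hv])]
      simp [hv]
      simpa using ih

-- B's remove loop computes the skip-filter
theorem sc_remove_loop_eq (skip_val : Int) (l : List Int) :
    sc_remove_loop skip_val l = l.filter (fun x => x ≠ skip_val) := by
  induction hn : l.length using Nat.strong_induction_on generalizing l with
  | _ n ih =>
    by_cases h : skip_val ∈ l
    · rw [sc_remove_loop]
      simp only [dif_pos h]
      have hrem := PySem.List.remove?_eq_some_erase l skip_val h
      split
      · rename_i r heq
        rw [hrem] at heq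
        obtain rfl : l.erase skip_val = r := by injection heq
        have hlt : (l.erase skip_val).length < l.length := by
          simpa [List.length_erase_of_mem h] using Nat.sub_lt (List.length_pos_of_mem h) one_pos
        rw [ih _ (hn ▸ hlt) _ rfl, filter_erase_eq]
      · rename_i heq
        rw [hrem] at heq
        exact absurd heq (by simp)
    · rw [sc_remove_loop]
      simp only [dif_neg h]
      refine (List.filter_eq_self.mpr ?_).symm
      intro x hx
      simp only [decide_eq_true_eq]
      rintro rfl; exact h hx

-- B's truncation step equals the stop-prefix
theorem trunc_eq_takeWhile (stop_val : Int) (nums : List Int) :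
    PySem.List.slice nums none
        (some (match PySem.List.index? nums stop_val with
               | some k => (k : Int)
               | none => (nums.length : Int)))
      = nums.takeWhile (fun x => x ≠ stop_val) := by
  cases hidx : PySem.List.index? nums stop_val with
  | none =>
    have hnm : stop_val ∉ nums := (PySem.List.index?_eq_none_iff nums stop_val).mp hidx
    rw [PySem.List.slice_to_natCast]
    simp only [List.take_length]
    symm
    refine List.takeWhile_eq_self_iff.mpr ?_
    intro x hx
    simp only [decide_eq_true_eq]
    rintro rfl; exact hnm hx
  | some k =>
    obtain ⟨pre, suf, hsplit, hlen, hnm⟩ := (PySem.List.index?_eq_some_iff nums stop_val k).mp hidx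
    rw [PySem.List.slice_to_natCast, hsplit, ← hlen]
    rw [List.take_left]
    symm
    subst hsplit
    clear hidx hlen
    induction pre with
    | nil => simp
    | cons p ps ihp =>
      have hp : p ≠ stop_val := fun h => hnm (h ▸ List.mem_cons_self)
      simp only [List.cons_append, List.takeWhile_cons, decide_eq_true_eq]
      rw [if_pos hp, ihp (fun h => hnm (List.mem_cons_of_mem _ h))]

-- ===== VERDICT (by name: the statement is the Claim_ definition above) =====
theorem skip_and_collect_spec : Claim_equal_skip_and_collect := by
  intro nums skip_val stop_val _
  unfold Spec_skip_and_collect skip_and_collect skip_and_collect_alt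
  rw [skip_and_collect_go_eq, sc_remove_loop_eq, trunc_eq_takeWhile]
  simp
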